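-- pv_equiv track=rewrite | github.com/Arko98/Alogirthms | Competitive_Coding/Minimum_Consecutive_Array_Element_Choosing_DP.py | solve
-- ===== SOURCE A (Python) =====
-- def solve(input1, input2, input3):
--     memo = [0]*(10**5)
--     sum_val = 0
--     for i in range(input1):
--         memo[i] += sum_val + input2[i]
--         sum_val += input2[i]
--
--     def choose(array, start, end):
--         if (start >= end):
--             return 0
--         else:
--             ans = 10**8
--             for j in range(start,end):
--                 sum1 = memo[j] - memo[start] + array[start]
--                 sum2 = memo[end] - memo[j+1] + array[j+1]
--                 temp_val = choose(array, start, j) + choose(array, j+1, end) + (sum1 + sum2)*input3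
--                 ans = min(temp_val, ans)
--             return ans
--     return choose(input2, 0, input1-1)
-- ===== SOURCE B (Python) =====
-- def solve(input1, input2, input3):
--     # Bottom-up interval DP (O(n^3)) instead of A's exponential naive recursion.
--     n = input1
--     if n <= 1:
--         return 0
--     pre = [0] * (n + 1)
--     for i in range(n):
--         pre[i + 1] = pre[i] + input2[i]
--     dp = [[0] * n for _ in range(n)]
--     for length in range(2, n + 1):
--         for s in range(0, n - length + 1):
--             e = s + length - 1
--             seg = (pre[e + 1] - pre[s]) * input3
--             best = 10 ** 8
--             for j in range(s, e):
--                 best = min(best, dp[s][j] + dp[j + 1][e] + seg)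
--             dp[s][e] = best
--     return dp[0][n - 1]
-- ===== Notes on version B (the rewrite author's own statement) =====
-- stated objective: faster
-- what changed: Replaced A's exponential naive recursion choose(start,end) by a bottom-up O(n^3) interval DP over prefix sums (and the per-split cost (sum1+sum2) is computed once per interval as the interval sum, since it does not depend on the split point).
import Mathlib
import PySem

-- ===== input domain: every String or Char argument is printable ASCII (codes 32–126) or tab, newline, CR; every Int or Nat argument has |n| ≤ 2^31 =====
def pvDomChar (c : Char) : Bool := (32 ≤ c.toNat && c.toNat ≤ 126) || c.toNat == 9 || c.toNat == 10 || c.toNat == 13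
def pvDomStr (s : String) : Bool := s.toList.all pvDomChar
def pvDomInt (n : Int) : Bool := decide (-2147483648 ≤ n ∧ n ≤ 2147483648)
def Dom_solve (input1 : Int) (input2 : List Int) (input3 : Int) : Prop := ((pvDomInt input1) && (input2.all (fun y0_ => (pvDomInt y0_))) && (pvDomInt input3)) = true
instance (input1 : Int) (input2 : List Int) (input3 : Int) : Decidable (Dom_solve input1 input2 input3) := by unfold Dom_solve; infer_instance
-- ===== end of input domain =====

-- B replaces A's exponential naive interval recursion by a bottom-up O(n^3) interval DP
-- over prefix sums (objective: faster, asymptotic).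

-- ===== PORT A =====
-- memo = [0]*(10**5); sum_val = 0; for i in range(input1): memo[i] += sum_val + input2[i]; sum_val += input2[i]
def buildMemoA (input1 : Int) (input2 : List Int) : List Int × Int :=
  (PySem.List.pyRange 0 input1 1).foldl
    (fun st i =>
      let v := PySem.List.pyGetD input2 i 0
      (PySem.List.pySetD st.1 i (PySem.List.pyGetD st.1 i 0 + (st.2 + v)), st.2 + v))
    (List.replicate 100000 0, 0)

-- def choose(array, start, end): literal transliteration (the loop is a foldl over range(start, end))
def chooseA (memo : List Int) (input3 : Int) (array : List Int) (s e : Int) : Int :=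
  if s ≥ e then 0
  else
    (PySem.List.pyRange s e 1).attach.foldl
      (fun ans j =>
        let sum1 := PySem.List.pyGetD memo j.val 0 - PySem.List.pyGetD memo s 0 + PySem.List.pyGetD array s 0
        let sum2 := PySem.List.pyGetD memo e 0 - PySem.List.pyGetD memo (j.val + 1) 0 + PySem.List.pyGetD array (j.val + 1) 0
        min (chooseA memo input3 array s j.val + chooseA memo input3 array (j.val + 1) e + (sum1 + sum2) * input3) ans)
      (10 ^ 8)
termination_by (e - s).toNat
decreasing_by
  all_goals (have hm := (PySem.List.mem_pyRange_one).1 j.property; omega)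

def solve (input1 : Int) (input2 : List Int) (input3 : Int) : Int :=
  chooseA (buildMemoA input1 input2).1 input3 input2 0 (input1 - 1)

-- ===== PORT B =====
def solve_alt (input1 : Int) (input2 : List Int) (input3 : Int) : Int :=
  let n := input1
  if n ≤ 1 then 0
  else
    let pre := (PySem.List.pyRange 0 n 1).foldl
      (fun pre i =>
        PySem.List.pySetD pre (i + 1) (PySem.List.pyGetD pre i 0 + PySem.List.pyGetD input2 i 0))
      (List.replicate (n.toNat + 1) 0)
    let dp := (PySem.List.pyRange 2 (n + 1) 1).foldl
      (fun dp L =>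
        (PySem.List.pyRange 0 (n - L + 1) 1).foldl
          (fun dp s =>
            let e := s + L - 1
            let seg := (PySem.List.pyGetD pre (e + 1) 0 - PySem.List.pyGetD pre s 0) * input3
            let best := (PySem.List.pyRange s e 1).foldl
              (fun best j =>
                min best (PySem.List.pyGetD (PySem.List.pyGetD dp s []) j 0
                  + PySem.List.pyGetD (PySem.List.pyGetD dp (j + 1) []) e 0 + seg))
              (10 ^ 8)
            PySem.List.pySetD dp s (PySem.List.pySetD (PySem.List.pyGetD dp s []) e best))
          dp)
      (List.replicate n.toNat (List.replicate n.toNat (0 : Int)))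
    PySem.List.pyGetD (PySem.List.pyGetD dp 0 []) (n - 1) 0

-- ===== PRECONDITION & SPEC =====
-- Pre_ excludes exactly the inputs on which A raises IndexError: input1 larger than
-- len(input2) (reading input2[i]) or larger than 10**5 (writing memo[i]).
def Pre_solve (input1 : Int) (input2 : List Int) (input3 : Int) : Prop :=
  input1 ≤ (input2.length : Int) ∧ input1 ≤ 100000
instance (input1 : Int) (input2 : List Int) (input3 : Int) : Decidable (Pre_solve input1 input2 input3) := by unfold Pre_solve; infer_instance

def pvWitness_solve : Int × List Int × Int := (3, [1, 2, 3], 2)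

def Spec_solve (input1 : Int) (input2 : List Int) (input3 : Int) (out : Int) : Prop := out = solve_alt input1 input2 input3
instance (input1 : Int) (input2 : List Int) (input3 : Int) (out : Int) : Decidable (Spec_solve input1 input2 input3 out) := by unfold Spec_solve; infer_instance

-- ===== CLAIM (what is proved, stated in full; the proofs are below) =====
def Claim_equal_solve : Prop := ∀ (input1 : Int) (input2 : List Int) (input3 : Int), Dom_solve input1 input2 input3 → Pre_solve input1 input2 input3 → Spec_solve input1 input2 input3 (solve input1 input2 input3)

-- ===== LEMMAS AND PROOFS =====

-- reference function: the interval recurrence with the interval sum written via prefix sums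
def Ch (a : List Int) (t : Int) (s e : Int) : Int :=
  if s ≥ e then 0
  else
    (PySem.List.pyRange s e 1).attach.foldl
      (fun ans j =>
        min (Ch a t s j.val + Ch a t (j.val + 1) e
          + ((a.take (e.toNat + 1)).sum - (a.take s.toNat).sum) * t) ans)
      (10 ^ 8)
termination_by (e - s).toNat
decreasing_by
  all_goals (have hm := (PySem.List.mem_pyRange_one).1 j.property; omega)

theorem set_append_cons {α : Type} (xs ys : List α) (y v : α) :
    (xs ++ y :: ys).set xs.length v = xs ++ v :: ys := by
  rw [List.set_append_right _ _ (le_refl _)]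
  simp

theorem getD_append_len {α : Type} [Inhabited α] (xs ys : List α) (y d : α) :
    (xs ++ y :: ys).getD xs.length d = y := by
  simp [List.getD_eq_getElem?_getD]

theorem buildMemoA_fold (a : List Int) (k : Nat) (h1 : (k : Int) ≤ a.length) (h2 : k ≤ 100000) :
    (PySem.List.pyRange 0 (k : Int) 1).foldl
      (fun st i =>
        let v := PySem.List.pyGetD a i 0
        (PySem.List.pySetD st.1 i (PySem.List.pyGetD st.1 i 0 + (st.2 + v)), st.2 + v))
      (List.replicate 100000 0, 0)
    = ((List.range k).map (fun i => (a.take (i + 1)).sum) ++ List.replicate (100000 - k) 0,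
        (a.take k).sum) := by
  induction k with
  | zero =>
    rw [Nat.cast_zero, PySem.List.pyRange_one_eq_nil (le_refl 0)]
    simp only [List.foldl_nil, List.range_zero, List.map_nil, List.nil_append, Nat.sub_zero,
      List.take_zero, List.sum_nil]
  | succ k ih =>
    have hk1 : ((k + 1 : Nat) : Int) = (k : Int) + 1 := by push_cast; ring
    rw [hk1, PySem.List.pyRange_one_succ_right (by positivity), List.foldl_append,
        ih (by omega) (by omega)]
    simp only [List.foldl_cons, List.foldl_nil]
    have hrep : (100000 - k) = (100000 - (k + 1)) + 1 := by omega
    have hkl : k < a.length := by omega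
    have hmla : ((List.range k).map (fun i => (a.take (i + 1)).sum)).length = k := by simp
    rw [hrep, List.replicate_succ]
    have htake : (a.take (k + 1)).sum = (a.take k).sum + a[k] := by
      rw [List.take_add_one, List.sum_append, List.getElem?_eq_getElem hkl]
      simp
    have hv : PySem.List.pyGetD a (k : Int) 0 = a[k] := by
      rw [PySem.List.pyGetD_natCast, List.getD_eq_getElem?_getD, List.getElem?_eq_getElem hkl]
      rfl
    have hget : PySem.List.pyGetD
        ((List.range k).map (fun i => (a.take (i + 1)).sum)
          ++ (0 : Int) :: List.replicate (100000 - (k + 1)) 0) (k : Int) 0 = 0 := by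
      have h := getD_append_len ((List.range k).map (fun i => (a.take (i + 1)).sum))
        (List.replicate (100000 - (k + 1)) 0) (0 : Int) 0
      rw [hmla] at h
      rw [PySem.List.pyGetD_natCast, h]
    have hset : PySem.List.pySetD
        ((List.range k).map (fun i => (a.take (i + 1)).sum)
          ++ (0 : Int) :: List.replicate (100000 - (k + 1)) 0) (k : Int)
        (0 + ((a.take k).sum + a[k]))
        = (List.range (k + 1)).map (fun i => (a.take (i + 1)).sum)
          ++ List.replicate (100000 - (k + 1)) 0 := by
      have h := set_append_cons ((List.range k).map (fun i => (a.take (i + 1)).sum))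
        (List.replicate (100000 - (k + 1)) 0) (0 : Int) (0 + ((a.take k).sum + a[k]))
      rw [hmla] at h
      rw [PySem.List.pySetD_natCast, h, List.range_succ, List.map_append, List.append_assoc]
      simp [htake]
    simp only [hv, hget, hset]
    refine Prod.ext rfl ?_
    simp [htake]

-- A-side: the memo array holds inclusive prefix sums of input2 below input1
theorem buildMemoA_spec (n : Int) (a : List Int) (h1 : n ≤ (a.length : Int)) (h2 : n ≤ 100000) :
    ∀ i : Int, 0 ≤ i → i < n →
      PySem.List.pyGetD (buildMemoA n a).1 i 0 = (a.take (i.toNat + 1)).sum := by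
  intro i hi0 hin
  have hn0 : 0 < n := lt_of_le_of_lt hi0 hin
  obtain ⟨k, rfl⟩ : ∃ k : Nat, n = (k : Int) := ⟨n.toNat, by omega⟩
  unfold buildMemoA
  rw [buildMemoA_fold a k (by exact_mod_cast h1) (by exact_mod_cast h2)]
  have hik : i.toNat < k := by omega
  rw [PySem.List.pyGetD_eq_getElem _ _ hi0 (by simp; omega)]
  rw [List.getElem_append_left (by simpa using hik)]
  simp

theorem chooseA_eq_Ch (n : Int) (a : List Int) (t : Int)
    (h1 : n ≤ (a.length : Int)) (h2 : n ≤ 100000) :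
    ∀ s e : Int, 0 ≤ s → e < n →
      chooseA (buildMemoA n a).1 t a s e = Ch a t s e := by
  have hlen : n ≤ (a.length : Int) := h1
  have hmemo := buildMemoA_spec n a h1 h2
  have hgeta : ∀ i : Int, 0 ≤ i → i < n →
      (a.take (i.toNat + 1)).sum = (a.take i.toNat).sum + PySem.List.pyGetD a i 0 := by
    intro i h0 hin
    have hl : i.toNat < a.length := by omega
    rw [List.take_add_one, List.sum_append, List.getElem?_eq_getElem hl,
        PySem.List.pyGetD_eq_getElem a 0 h0 (by omega)]
    simp
  have main : ∀ m : Nat, ∀ s e : Int, (e - s).toNat = m → 0 ≤ s → e < n →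
      chooseA (buildMemoA n a).1 t a s e = Ch a t s e := by
    intro m
    induction m using Nat.strong_induction_on with
    | _ m ih =>
      intro s e hm hs he
      rw [chooseA, Ch]
      by_cases hse : s ≥ e
      · simp [hse]
      · simp only [if_neg hse]
        apply PySem.List.foldl_congr_mem
        intro acc j _
        have hj := (PySem.List.mem_pyRange_one).1 j.property
        have h1r := ih (j.val - s).toNat (by omega) s j.val rfl hs (by omega)
        have h2r := ih (e - (j.val + 1)).toNat (by omega) (j.val + 1) e rfl (by omega) he
        simp only [h1r, h2r]
        congr 2
        -- sum1 + sum2 equals the interval sum via prefix sums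
        have hmj := hmemo j.val (by omega) (by omega)
        have hms := hmemo s hs (by omega)
        have hme := hmemo e (by omega) he
        have hmj1 := hmemo (j.val + 1) (by omega) (by omega)
        have hsucc1 : ((j.val + 1).toNat) = j.val.toNat + 1 := by omega
        have hfs := hgeta s hs (by omega)
        have hfj1 := hgeta (j.val + 1) (by omega) (by omega)
        rw [PySem.List.pyGetD_eq_getElem a 0 hs (by omega)] at hfs ⊢
        rw [PySem.List.pyGetD_eq_getElem a 0 (by omega : (0:Int) ≤ j.val + 1) (by omega)] at hfj1 ⊢
        rw [hmj, hms, hme, hmj1]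
        simp only [hsucc1] at hfj1 ⊢
        have hesucc : (a.take (e.toNat + 1)).sum = (a.take e.toNat).sum + a[e.toNat]'(by omega) := by
          rw [List.take_add_one, List.sum_append, List.getElem?_eq_getElem (by omega : e.toNat < a.length)]
          simp
        congr 1
        omega
  intro s e hs he
  exact main (e - s).toNat s e rfl hs he

theorem solve_eq_Ch (n : Int) (a : List Int) (t : Int)
    (h1 : n ≤ (a.length : Int)) (h2 : n ≤ 100000) :
    solve n a t = Ch a t 0 (n - 1) := by
  unfold solve
  exact chooseA_eq_Ch n a t h1 h2 0 (n - 1) (le_refl 0) (by omega)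

-- B-side: the pre array holds exclusive prefix sums of input2
theorem preB_fold (a : List Int) (N : Nat) (hlen : (N : Int) ≤ a.length) :
    ∀ k : Nat, k ≤ N →
      (PySem.List.pyRange 0 (k : Int) 1).foldl
        (fun pre i =>
          PySem.List.pySetD pre (i + 1) (PySem.List.pyGetD pre i 0 + PySem.List.pyGetD a i 0))
        (List.replicate (N + 1) 0)
      = (List.range (k + 1)).map (fun i => (a.take i).sum) ++ List.replicate (N - k) 0 := by
  intro k
  induction k with
  | zero =>
    intro _
    rw [Nat.cast_zero, PySem.List.pyRange_one_eq_nil (le_refl 0)]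
    simp [List.replicate_succ]
  | succ k ih =>
    intro hk
    have hk1 : ((k + 1 : Nat) : Int) = (k : Int) + 1 := by push_cast; ring
    rw [hk1, PySem.List.pyRange_one_succ_right (by positivity), List.foldl_append,
        ih (by omega)]
    simp only [List.foldl_cons, List.foldl_nil]
    have hkl : k < a.length := by omega
    have hmla : ((List.range (k + 1)).map (fun i => ((a.take i).sum : Int))).length = k + 1 := by
      simp
    have hrep : (N - k) = (N - (k + 1)) + 1 := by omega
    rw [hrep, List.replicate_succ]
    have htake : (a.take (k + 1)).sum = (a.take k).sum + a[k] := by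
      rw [List.take_add_one, List.sum_append, List.getElem?_eq_getElem hkl]
      simp
    have hva : PySem.List.pyGetD a (k : Int) 0 = a[k] := by
      rw [PySem.List.pyGetD_natCast, List.getD_eq_getElem?_getD, List.getElem?_eq_getElem hkl]
      rfl
    have hget : PySem.List.pyGetD
        ((List.range (k + 1)).map (fun i => ((a.take i).sum : Int))
          ++ (0 : Int) :: List.replicate (N - (k + 1)) 0) (k : Int) 0 = (a.take k).sum := by
      rw [PySem.List.pyGetD_natCast, List.getD_eq_getElem?_getD,
          List.getElem?_append_left (by simp)]
      simp
    have hcast : ((k : Int) + 1) = ((k + 1 : Nat) : Int) := by push_cast; ring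
    have hset : PySem.List.pySetD
        ((List.range (k + 1)).map (fun i => ((a.take i).sum : Int))
          ++ (0 : Int) :: List.replicate (N - (k + 1)) 0) ((k : Int) + 1)
        ((a.take k).sum + a[k])
        = (List.range (k + 2)).map (fun i => ((a.take i).sum : Int))
          ++ List.replicate (N - (k + 1)) 0 := by
      rw [hcast, PySem.List.pySetD_natCast]
      have h := set_append_cons ((List.range (k + 1)).map (fun i => ((a.take i).sum : Int)))
        (List.replicate (N - (k + 1)) 0) (0 : Int) ((a.take k).sum + a[k])
      rw [hmla] at h
      rw [h]
      conv_rhs => rw [show k + 2 = (k + 1) + 1 from rfl, List.range_succ]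
      rw [List.map_append, List.append_assoc]
      simp [htake]
    rw [hva, hget, hset]

theorem preB_spec (a : List Int) (n : Int) (hn : 0 ≤ n) (hlen : n ≤ (a.length : Int)) :
    ∀ i : Int, 0 ≤ i → i ≤ n →
      PySem.List.pyGetD
        ((PySem.List.pyRange 0 n 1).foldl
          (fun pre i =>
            PySem.List.pySetD pre (i + 1) (PySem.List.pyGetD pre i 0 + PySem.List.pyGetD a i 0))
          (List.replicate (n.toNat + 1) 0)) i 0
      = (a.take i.toNat).sum := by
  intro i h0 hi
  obtain ⟨N, rfl⟩ : ∃ N : Nat, n = (N : Int) := ⟨n.toNat, by omega⟩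
  rw [show ((N : Int).toNat + 1) = N + 1 by omega]
  rw [preB_fold a N (by exact_mod_cast hlen) N (le_refl N)]
  have hiN : i.toNat ≤ N := by omega
  rw [PySem.List.pyGetD_eq_getElem _ 0 h0 (by simp; omega)]
  rw [List.getElem_append_left (by simp; omega)]
  simp

-- Ch unfolded to a plain foldl over the range (the attach is proof-carrying only)
theorem Ch_fold (a : List Int) (t s e : Int) (h : s < e) :
    Ch a t s e = (PySem.List.pyRange s e 1).foldl
      (fun ans jv => min (Ch a t s jv + Ch a t (jv + 1) e
        + ((a.take (e.toNat + 1)).sum - (a.take s.toNat).sum) * t) ans)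
      (10 ^ 8) := by
  rw [Ch, if_neg (by omega)]
  exact List.foldl_attach (f := fun ans jv => min (Ch a t s jv + Ch a t (jv + 1) e
    + ((a.take (e.toNat + 1)).sum - (a.take s.toNat).sum) * t) ans)

theorem Ch_diag (a : List Int) (t s e : Int) (h : s ≥ e) : Ch a t s e = 0 := by
  rw [Ch, if_pos h]

-- the dp-table invariant: all intervals of length ≤ L (and extra starts below m at length L) are solved
def DpPart (a : List Int) (t n L : Int) (m : Int) (dp : List (List Int)) : Prop :=
  dp.length = n.toNat ∧ (∀ r ∈ dp, r.length = n.toNat) ∧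
  ∀ s e : Int, 0 ≤ s → s ≤ e → e < n → (e - s + 1 ≤ L - 1 ∨ (e - s + 1 = L ∧ s < m)) →
    PySem.List.pyGetD (PySem.List.pyGetD dp s []) e 0 = Ch a t s e

theorem best_eq_Ch (a : List Int) (t n L : Int) (pre : List Int)
    (hpre : ∀ i : Int, 0 ≤ i → i ≤ n → PySem.List.pyGetD pre i 0 = (a.take i.toNat).sum)
    (hL : 2 ≤ L) (hLn : L ≤ n) (m : Int) (h0 : 0 ≤ m) (hm : m ≤ n - L)
    (dp : List (List Int)) (hdp : DpPart a t n L m dp) :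
    (PySem.List.pyRange m (m + L - 1) 1).foldl
      (fun best j => min best (PySem.List.pyGetD (PySem.List.pyGetD dp m []) j 0
        + PySem.List.pyGetD (PySem.List.pyGetD dp (j + 1) []) (m + L - 1) 0
        + (PySem.List.pyGetD pre (m + L - 1 + 1) 0 - PySem.List.pyGetD pre m 0) * t))
      (10 ^ 8)
    = Ch a t m (m + L - 1) := by
  rw [Ch_fold a t m (m + L - 1) (by omega)]
  apply PySem.List.foldl_congr_mem
  intro acc j hj
  have hjb := (PySem.List.mem_pyRange_one).1 hj
  rw [min_comm]
  congr 1
  have hA := hdp.2.2 m j h0 (by omega) (by omega) (by left; omega)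
  have hB := hdp.2.2 (j + 1) (m + L - 1) (by omega) (by omega) (by omega) (by left; omega)
  rw [hA, hB]
  congr 1
  rw [hpre (m + L - 1 + 1) (by omega) (by omega), hpre m h0 (by omega),
      show (m + L - 1 + 1).toNat = (m + L - 1).toNat + 1 by omega]

theorem dp_step (a : List Int) (t n L : Int) (pre : List Int)
    (hpre : ∀ i : Int, 0 ≤ i → i ≤ n → PySem.List.pyGetD pre i 0 = (a.take i.toNat).sum)
    (hL : 2 ≤ L) (hLn : L ≤ n) (m : Int) (h0 : 0 ≤ m) (hm : m ≤ n - L)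
    (dp : List (List Int)) (hdp : DpPart a t n L m dp) :
    DpPart a t n L (m + 1)
      (PySem.List.pySetD dp m (PySem.List.pySetD (PySem.List.pyGetD dp m []) (m + L - 1)
        ((PySem.List.pyRange m (m + L - 1) 1).foldl
          (fun best j => min best (PySem.List.pyGetD (PySem.List.pyGetD dp m []) j 0
            + PySem.List.pyGetD (PySem.List.pyGetD dp (j + 1) []) (m + L - 1) 0
            + (PySem.List.pyGetD pre (m + L - 1 + 1) 0 - PySem.List.pyGetD pre m 0) * t))
          (10 ^ 8)))) := by
  obtain ⟨hlen, hrows, hent⟩ := hdp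
  set best := (PySem.List.pyRange m (m + L - 1) 1).foldl
      (fun best j => min best (PySem.List.pyGetD (PySem.List.pyGetD dp m []) j 0
        + PySem.List.pyGetD (PySem.List.pyGetD dp (j + 1) []) (m + L - 1) 0
        + (PySem.List.pyGetD pre (m + L - 1 + 1) 0 - PySem.List.pyGetD pre m 0) * t))
      (10 ^ 8) with hbest
  have hbestCh : best = Ch a t m (m + L - 1) :=
    best_eq_Ch a t n L pre hpre hL hLn m h0 hm dp ⟨hlen, hrows, hent⟩
  have hmlt : m.toNat < dp.length := by omega
  have hrowm : PySem.List.pyGetD dp m [] = dp[m.toNat] := by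
    rw [PySem.List.pyGetD_eq_getElem dp [] h0 (by omega)]
  have hrowlen : dp[m.toNat].length = n.toNat := hrows _ (List.getElem_mem hmlt)
  have he0 : (m + L - 1).toNat < dp[m.toNat].length := by omega
  have hrow' : PySem.List.pySetD (PySem.List.pyGetD dp m []) (m + L - 1) best
      = dp[m.toNat].set (m + L - 1).toNat best := by
    rw [hrowm, PySem.List.pySetD_of_nonneg _ _ (by omega)]
  have hdp' : PySem.List.pySetD dp m (PySem.List.pySetD (PySem.List.pyGetD dp m []) (m + L - 1) best)
      = dp.set m.toNat (dp[m.toNat].set (m + L - 1).toNat best) := by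
    rw [hrow', PySem.List.pySetD_of_nonneg _ _ h0]
  rw [hdp']
  refine ⟨by simpa using hlen, ?_, ?_⟩
  · intro r hr
    rcases List.mem_or_eq_of_mem_set hr with hr' | rfl
    · exact hrows r hr'
    · simpa using hrowlen
  · intro s e hs hse hen hcond
    have hslen : s.toNat < (dp.set m.toNat (dp[m.toNat].set (m + L - 1).toNat best)).length := by
      simp; omega
    rw [PySem.List.pyGetD_eq_getElem _ [] hs (by simp only [List.length_set]; omega)]
    by_cases hsm : s = m
    · subst hsm
      rw [List.getElem_set_self (by simp only [List.length_set]; omega)]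
      by_cases hee : e = s + L - 1
      · -- the freshly written entry
        subst hee
        rw [PySem.List.pyGetD_eq_getElem _ 0 (by omega) (by simp only [List.length_set]; omega),
            List.getElem_set_self (by simp only [List.length_set]; omega), hbestCh]
      · -- an older entry in the same row, untouched column
        have hcls : e - s + 1 ≤ L - 1 := by
          rcases hcond with h | h
          · exact h
          · exfalso; omega
        have hne : (s + L - 1).toNat ≠ e.toNat := by omega
        rw [PySem.List.pyGetD_eq_getElem _ 0 (by omega) (by simp only [List.length_set]; omega),
            List.getElem_set_ne hne (by simp only [List.length_set]; omega)]
        have hq := hent s e hs hse hen (Or.inl hcls)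
        rw [PySem.List.pyGetD_eq_getElem _ [] hs (by omega),
            PySem.List.pyGetD_eq_getElem _ 0 (by omega) (by omega)] at hq
        exact hq
    · -- a different row, untouched
      rw [List.getElem_set_ne (show m.toNat ≠ s.toNat by omega) (by simp only [List.length_set]; omega)]
      have hcond' : e - s + 1 ≤ L - 1 ∨ (e - s + 1 = L ∧ s < m) := by
        rcases hcond with h | h
        · exact Or.inl h
        · exact Or.inr ⟨h.1, by omega⟩
      have := hent s e hs hse hen hcond'
      rw [PySem.List.pyGetD_eq_getElem _ [] hs (by omega)] at this
      exact this

theorem dp_inner (a : List Int) (t n L : Int) (pre : List Int)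
    (hpre : ∀ i : Int, 0 ≤ i → i ≤ n → PySem.List.pyGetD pre i 0 = (a.take i.toNat).sum)
    (hL : 2 ≤ L) (hLn : L ≤ n) (dp : List (List Int)) (hdp : DpPart a t n L 0 dp) :
    ∀ k : Nat, (k : Int) ≤ n - L + 1 →
      DpPart a t n L (k : Int)
        ((PySem.List.pyRange 0 (k : Int) 1).foldl
          (fun dp s =>
            PySem.List.pySetD dp s (PySem.List.pySetD (PySem.List.pyGetD dp s []) (s + L - 1)
              ((PySem.List.pyRange s (s + L - 1) 1).foldl
                (fun best j => min best (PySem.List.pyGetD (PySem.List.pyGetD dp s []) j 0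
                  + PySem.List.pyGetD (PySem.List.pyGetD dp (j + 1) []) (s + L - 1) 0
                  + (PySem.List.pyGetD pre (s + L - 1 + 1) 0 - PySem.List.pyGetD pre s 0) * t))
                (10 ^ 8))))
          dp) := by
  intro k
  induction k with
  | zero =>
    intro _
    rw [Nat.cast_zero, PySem.List.pyRange_one_eq_nil (le_refl 0)]
    exact hdp
  | succ k ih =>
    intro hk
    have hk1 : ((k + 1 : Nat) : Int) = (k : Int) + 1 := by push_cast; ring
    rw [hk1, PySem.List.pyRange_one_succ_right (by positivity), List.foldl_append]
    simp only [List.foldl_cons, List.foldl_nil]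
    exact dp_step a t n L pre hpre hL hLn (k : Int) (by positivity) (by omega)
      _ (ih (by omega))

theorem dp_outer (a : List Int) (t n : Int) (pre : List Int)
    (hn : 1 < n)
    (hpre : ∀ i : Int, 0 ≤ i → i ≤ n → PySem.List.pyGetD pre i 0 = (a.take i.toNat).sum) :
    ∀ k : Nat, (k : Int) + 2 ≤ n + 1 →
      DpPart a t n ((k : Int) + 1) (n : Int)
        ((PySem.List.pyRange 2 ((k : Int) + 2) 1).foldl
          (fun dp L =>
            (PySem.List.pyRange 0 (n - L + 1) 1).foldl
              (fun dp s =>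
                PySem.List.pySetD dp s (PySem.List.pySetD (PySem.List.pyGetD dp s []) (s + L - 1)
                  ((PySem.List.pyRange s (s + L - 1) 1).foldl
                    (fun best j => min best (PySem.List.pyGetD (PySem.List.pyGetD dp s []) j 0
                      + PySem.List.pyGetD (PySem.List.pyGetD dp (j + 1) []) (s + L - 1) 0
                      + (PySem.List.pyGetD pre (s + L - 1 + 1) 0 - PySem.List.pyGetD pre s 0) * t))
                    (10 ^ 8))))
              dp)
          (List.replicate n.toNat (List.replicate n.toNat (0 : Int)))) := by
  have conv1 : ∀ (L0 : Int) (dp : List (List Int)),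
      DpPart a t n L0 n dp → DpPart a t n (L0 + 1) 0 dp := by
    intro L0 dp ⟨ha, hb, hc⟩
    refine ⟨ha, hb, ?_⟩
    intro s e hs hse hen hcond
    apply hc s e hs hse hen
    rcases hcond with h | h
    · by_cases hle : e - s + 1 ≤ L0 - 1
      · exact Or.inl hle
      · exact Or.inr ⟨by omega, by omega⟩
    · exact absurd h.2 (by omega)
  have conv2 : ∀ (L0 : Int) (dp : List (List Int)), 0 ≤ n - L0 + 1 →
      DpPart a t n L0 (n - L0 + 1) dp → DpPart a t n L0 n dp := by
    intro L0 dp hnl ⟨ha, hb, hc⟩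
    refine ⟨ha, hb, ?_⟩
    intro s e hs hse hen hcond
    apply hc s e hs hse hen
    rcases hcond with h | h
    · exact Or.inl h
    · exact Or.inr ⟨h.1, by omega⟩
  intro k
  induction k with
  | zero =>
    intro _
    simp only [Nat.cast_zero, zero_add]
    rw [PySem.List.pyRange_one_eq_nil (le_refl 2), List.foldl_nil]
    refine ⟨by simp, by intro r hr; rw [List.eq_of_mem_replicate hr]; simp, ?_⟩
    intro s e hs hse hen hcond
    have hes : e = s := by omega
    have hsl : s.toNat < (List.replicate n.toNat (List.replicate n.toNat (0 : Int))).length := by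
      simp; omega
    rw [PySem.List.pyGetD_eq_getElem _ [] hs (by simp; omega),
        List.getElem_replicate,
        PySem.List.pyGetD_eq_getElem _ 0 (by omega) (by simp; omega),
        List.getElem_replicate, Ch_diag a t s e (by omega)]
  | succ k ih =>
    intro hk
    have hk1 : ((k + 1 : Nat) : Int) = (k : Int) + 1 := by push_cast; ring
    rw [hk1, show (k : Int) + 1 + 2 = ((k : Int) + 2) + 1 by ring,
        PySem.List.pyRange_one_succ_right (by omega), List.foldl_append]
    simp only [List.foldl_cons, List.foldl_nil]
    have hL : (2 : Int) ≤ (k : Int) + 2 := by omega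
    have hLn : (k : Int) + 2 ≤ n := by omega
    have hprev := conv1 ((k : Int) + 1) _ (ih (by omega))
    rw [show (k : Int) + 1 + 1 = (k : Int) + 2 by ring] at hprev
    obtain ⟨k', hk'⟩ : ∃ k' : Nat, (k' : Int) = n - ((k : Int) + 2) + 1 := ⟨(n - ((k : Int) + 2) + 1).toNat, by omega⟩
    have hinner := dp_inner a t n ((k : Int) + 2) pre hpre hL hLn _ hprev k' (by omega)
    rw [hk'] at hinner
    rw [show (k : Int) + 1 + 1 = (k : Int) + 2 by ring]
    exact conv2 _ _ (by omega) hinner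

theorem solve_alt_eq_Ch (n : Int) (a : List Int) (t : Int)
    (h1 : n ≤ (a.length : Int)) :
    solve_alt n a t = Ch a t 0 (n - 1) := by
  unfold solve_alt
  by_cases hle : n ≤ 1
  · rw [if_pos hle, Ch_diag a t 0 (n - 1) (by omega)]
  · rw [if_neg hle]
    have hpre := preB_spec a n (by omega) h1
    have hout := dp_outer a t n _ (by omega) hpre (n - 1).toNat (by omega)
    rw [show (((n - 1).toNat : Int)) = n - 1 by omega] at hout
    rw [show (n - 1) + 2 = n + 1 by ring, show (n - 1) + 1 = n by ring] at hout
    exact (hout.2.2 0 (n - 1) (le_refl 0) (by omega) (by omega)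
      (Or.inr ⟨by ring, by omega⟩)).symm ▸ rfl

-- ===== VERDICT (by name: the statement is the Claim_ definition above) =====
theorem solve_spec : Claim_equal_solve := by
  intro input1 input2 input3 _hdom hpre
  unfold Spec_solve
  rw [solve_eq_Ch input1 input2 input3 hpre.1 hpre.2,
      solve_alt_eq_Ch input1 input2 input3 hpre.1]
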